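-- pv_equiv track=rewrite | github.com/PeterKADam/Bioinformatics | Project-Lars/Assemblyproject/assemblyproject.py | get_all_overlaps
-- ===== SOURCE A (Python) =====
-- def get_overlap(left, right):
--     max_overlap = min(len(left), len(right))
--     for i in range(max_overlap):
--         ovl = max_overlap - i
--         if left[-ovl:] == right[:ovl]:
--             return left[-ovl:]
--     return ""
--
-- def get_all_overlaps(dict):
--     dick = {}
--
--     for i in dict:
--         dick[i] = {}
--         for y in dict:
--             if i != y:
--                 dick[i][y] = len(get_overlap(dict[i], dict[y]))
--     return dick
-- ===== SOURCE B (Python) =====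
-- # B: per pair, the overlap length is read off as the KMP prefix-function value at the
-- # end of right + "\x00" + left (a different algorithm than A's descending slice compare).
-- def _overlap_len(left, right):
--     s = right + "\x00" + left
--     pi = [0] * len(s)
--     k = 0
--     for i in range(1, len(s)):
--         while k > 0 and s[i] != s[k]:
--             k = pi[k - 1]
--         if s[i] == s[k]:
--             k += 1
--         pi[i] = k
--     return k
--
-- def get_all_overlaps(dict):
--     keys = list(dict)
--     return {i: {y: _overlap_len(dict[i], dict[y]) for y in keys if y != i} for i in keys}
-- ===== Notes on version B (the rewrite author's own statement) =====
-- stated objective: alternative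
-- what changed: Per pair, A tries every candidate overlap length in descending order and compares slices; B instead reads the longest suffix-prefix overlap off as the KMP prefix-function value at the end of right + '\x00' + left.
import Mathlib
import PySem

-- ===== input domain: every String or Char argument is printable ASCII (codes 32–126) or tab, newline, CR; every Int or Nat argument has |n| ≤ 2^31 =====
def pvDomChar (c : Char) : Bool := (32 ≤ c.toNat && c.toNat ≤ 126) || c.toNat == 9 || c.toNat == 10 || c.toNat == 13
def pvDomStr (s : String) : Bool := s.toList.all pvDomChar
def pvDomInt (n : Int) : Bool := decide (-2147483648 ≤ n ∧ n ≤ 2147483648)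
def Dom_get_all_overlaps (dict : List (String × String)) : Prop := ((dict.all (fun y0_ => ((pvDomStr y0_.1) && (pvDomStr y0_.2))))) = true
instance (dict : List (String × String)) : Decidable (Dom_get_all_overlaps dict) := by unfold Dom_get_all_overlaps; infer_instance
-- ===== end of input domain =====

-- B replaces A's per-pair descending slice comparisons by the KMP prefix function on
-- right + chr(0) + left (objective: a genuinely different algorithm, same exact values).

-- ===== PORT A =====
-- A.get_overlap: descending loop 'for i in range(max_overlap): ovl = max_overlap - i; if left[-ovl:] == right[:ovl]: return left[-ovl:]'
def pvGoA (l r : List Char) : Nat → List Char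
  | 0 => []
  | ovl+1 =>
    if PySem.List.slice l (some (-(((ovl+1 : Nat)) : Int))) none = PySem.List.slice r none (some ((((ovl+1 : Nat)) : Int)))
    then PySem.List.slice l (some (-(((ovl+1 : Nat)) : Int))) none
    else pvGoA l r ovl

def pvGetOverlap (left right : String) : List Char :=
  pvGoA left.toList right.toList (min left.toList.length right.toList.length)

-- 'dick[i] = {}; for y: ... dick[i][y] = v' builds the whole inner dict before the next i;
-- since each key i is inserted once, inserting the finished inner dict at i is the same Dict.
def get_all_overlaps (dict : List (String × String)) : List (String × List (String × Int)) :=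
  let d := PySem.Dict.ofList dict
  let dick := d.keys.foldl (fun dk i =>
    dk.insert i (d.keys.foldl (fun inn y =>
      if i ≠ y then inn.insert y ((pvGetOverlap (d.getD i "") (d.getD y "")).length : Int) else inn)
      (PySem.Dict.empty))) (PySem.Dict.empty : PySem.Dict String (PySem.Dict String Int))
  dick.items.map (fun p => (p.1, p.2.items))

-- ===== PORT B =====
-- B._overlap_len: KMP prefix function over s = right + chr(0) + left; returns the final k.
-- The Python 'while k > 0 and s[i] != s[k]: k = pi[k-1]' is ported with fuel = k; since every
-- stored pi[j] satisfies pi[j] <= j, k strictly decreases each iteration, so fuel k is exact.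
def pvKmpFall (s : List Char) (pi : List Nat) (c : Char) : Nat → Nat → Nat
  | 0, k => k
  | fuel+1, k => if k ≠ 0 ∧ s.getD k ' ' ≠ c then pvKmpFall s pi c fuel (pi.getD (k-1) 0) else k

-- after the while loop: 'if s[i] == s[k]: k += 1'
def pvKmpNext (s : List Char) (pi : List Nat) (k i : Nat) : Nat :=
  if s.getD i ' ' = s.getD (pvKmpFall s pi (s.getD i ' ') k k) ' '
  then pvKmpFall s pi (s.getD i ' ') k k + 1
  else pvKmpFall s pi (s.getD i ' ') k k

-- 'for i in range(1, len(s)): <fall>; if s[i] == s[k]: k += 1; pi[i] = k'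
def pvKmpLoop (s : List Char) (pi : List Nat) (k i : Nat) : Nat :=
  if i < s.length then
    pvKmpLoop s (pi.set i (pvKmpNext s pi k i)) (pvKmpNext s pi k i) (i+1)
  else k
termination_by s.length - i

def pvOverlapLen (left right : String) : Nat :=
  let s := right.toList ++ Char.ofNat 0 :: left.toList
  pvKmpLoop s (List.replicate s.length 0) 0 1

-- dict comprehensions over the (distinct, insertion-ordered) keys = map / filter+map on keys (exact).
def get_all_overlaps_alt (dict : List (String × String)) : List (String × List (String × Int)) :=
  let d := PySem.Dict.ofList dict
  let keys := d.keys
  keys.map (fun i =>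
    (i, (keys.filter (fun y => y ≠ i)).map (fun y =>
      (y, (pvOverlapLen (d.getD i "") (d.getD y "") : Int)))))

-- ===== PRECONDITION & SPEC =====
def Spec_get_all_overlaps (dict : List (String × String)) (out : List (String × List (String × Int))) : Prop := out = get_all_overlaps_alt dict
instance (dict : List (String × String)) (out : List (String × List (String × Int))) : Decidable (Spec_get_all_overlaps dict out) := by unfold Spec_get_all_overlaps; infer_instance

-- ===== CLAIM (what is proved, stated in full; the proofs are below) =====
def Claim_equal_get_all_overlaps : Prop := ∀ (dict : List (String × String)), Dom_get_all_overlaps dict → Spec_get_all_overlaps dict (get_all_overlaps dict)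

-- ===== LEMMAS AND PROOFS =====
-- k is the length of a proper border of `s.take i` (prefix = suffix), stated pointwise.
def pvPS (s : List Char) (i k : Nat) : Prop :=
  k < i ∧ i ≤ s.length ∧ ∀ x, x < k → s.getD x ' ' = s.getD (i - k + x) ' '

-- k is the LONGEST such border length of `s.take i`.
def pvMaxPS (s : List Char) (i k : Nat) : Prop :=
  (k = 0 ∨ pvPS s i k) ∧ ∀ j, pvPS s i j → j ≤ k

lemma pvPS_zero {s : List Char} {i : Nat} (h0 : 0 < i) (hl : i ≤ s.length) : pvPS s i 0 :=
  ⟨h0, hl, fun x hx => absurd hx (Nat.not_lt_zero x)⟩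

lemma pvPS_ext {s : List Char} {i k : Nat} (hi : i < s.length) :
    pvPS s (i+1) (k+1) ↔ pvPS s i k ∧ s.getD k ' ' = s.getD i ' ' := by
  constructor
  · rintro ⟨hk, hlen, hp⟩
    refine ⟨⟨by omega, by omega, fun x hx => ?_⟩, ?_⟩
    · have h := hp x (by omega)
      have e : i + 1 - (k + 1) + x = i - k + x := by omega
      rwa [e] at h
    · have h := hp k (by omega)
      have e : i + 1 - (k + 1) + k = i := by omega
      rwa [e] at h
  · rintro ⟨⟨hk, hlen, hp⟩, hc⟩
    refine ⟨by omega, by omega, fun x hx => ?_⟩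
    have e : i + 1 - (k + 1) + x = i - k + x := by omega
    rw [e]
    rcases Nat.lt_or_ge x k with h | h
    · exact hp x h
    · have hxk : x = k := by omega
      subst hxk
      have e2 : i - x + x = i := by omega
      rw [e2]; exact hc

lemma pvPS_trans {s : List Char} {i k j : Nat} (h1 : pvPS s i k) (h2 : pvPS s k j) :
    pvPS s i j := by
  obtain ⟨hk, hil, hp1⟩ := h1
  obtain ⟨hj, hkl, hp2⟩ := h2
  refine ⟨by omega, hil, fun x hx => ?_⟩
  have e1 := hp2 x hx
  have e2 := hp1 (k - j + x) (by omega)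
  have e : i - k + (k - j + x) = i - j + x := by omega
  rw [e] at e2
  rw [e1, e2]

lemma pvPS_down {s : List Char} {i k j : Nat} (h1 : pvPS s i k) (h2 : pvPS s i j)
    (hjk : j < k) : pvPS s k j := by
  obtain ⟨hk, hil, hp1⟩ := h1
  obtain ⟨hj, _, hp2⟩ := h2
  refine ⟨hjk, by omega, fun x hx => ?_⟩
  have e1 := hp2 x hx
  have e2 := hp1 (k - j + x) (by omega)
  have e : i - k + (k - j + x) = i - j + x := by omega
  rw [e] at e2
  rw [e1, ← e2]

-- The while loop: starting from the maximal border candidate, the pi-chain visits every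
-- border length, so the result is the largest char-matching one.
lemma pvKmpFall_spec (s : List Char) (pi : List Nat) (c : Char) (i : Nat)
    (Hpi : ∀ j, j < i → pvMaxPS s (j+1) (pi.getD j 0)) :
    ∀ fuel k, k ≤ fuel → (k = 0 ∨ pvPS s i k) →
      (∀ j, pvPS s i j → s.getD j ' ' = c → j ≤ k) →
      ((pvKmpFall s pi c fuel k = 0 ∨
         (pvPS s i (pvKmpFall s pi c fuel k) ∧ s.getD (pvKmpFall s pi c fuel k) ' ' = c)) ∧
       (∀ j, pvPS s i j → s.getD j ' ' = c → j ≤ pvKmpFall s pi c fuel k)) := by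
  intro fuel
  induction fuel with
  | zero =>
    intro k hk h1 h2
    have hk0 : k = 0 := by omega
    subst hk0
    exact ⟨Or.inl rfl, h2⟩
  | succ fuel ih =>
    intro k hk h1 h2
    by_cases hcond : k ≠ 0 ∧ s.getD k ' ' ≠ c
    · have hPS : pvPS s i k := by
        rcases h1 with h | h
        · exact absurd h hcond.1
        · exact h
      have hki : k < i := hPS.1
      have hmax : pvMaxPS s (k - 1 + 1) (pi.getD (k-1) 0) := Hpi (k-1) (by omega)
      have ek : k - 1 + 1 = k := by omega
      rw [ek] at hmax
      have hlt : pi.getD (k-1) 0 < k := by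
        rcases hmax.1 with h | h
        · omega
        · exact h.1
      have step : pvKmpFall s pi c (fuel+1) k = pvKmpFall s pi c fuel (pi.getD (k-1) 0) := by
        simp only [pvKmpFall]
        rw [if_pos hcond]
      rw [step]
      apply ih
      · omega
      · rcases hmax.1 with h | h
        · exact Or.inl h
        · exact Or.inr (pvPS_trans hPS h)
      · intro j hj hcj
        have hjk : j ≤ k := h2 j hj hcj
        have hjk' : j < k := by
          rcases Nat.lt_or_ge j k with h | h
          · exact h
          · exfalso
            have hje : j = k := by omega
            subst hje
            exact hcond.2 hcj
        exact hmax.2 j (pvPS_down hPS hj hjk')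
    · have step : pvKmpFall s pi c (fuel+1) k = k := by
        simp only [pvKmpFall]
        rw [if_neg hcond]
      rw [step]
      refine ⟨?_, h2⟩
      by_cases hk0 : k = 0
      · exact Or.inl hk0
      · have hPS : pvPS s i k := by
          rcases h1 with h | h
          · exact absurd h hk0
          · exact h
        have hcc : s.getD k ' ' = c := by
          by_contra hne
          exact hcond ⟨hk0, hne⟩
        exact Or.inr ⟨hPS, hcc⟩

lemma pvKmpNext_spec (s : List Char) (pi : List Nat) (k i : Nat)
    (hil : i < s.length) (h1i : 1 ≤ i)
    (Hpi : ∀ j, j < i → pvMaxPS s (j+1) (pi.getD j 0))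
    (Hk : pvMaxPS s i k) :
    pvMaxPS s (i+1) (pvKmpNext s pi k i) := by
  obtain ⟨hf1, hf2⟩ := pvKmpFall_spec s pi (s.getD i ' ') i Hpi k k (Nat.le_refl k) Hk.1
    (fun j hj _ => Hk.2 j hj)
  unfold pvKmpNext
  by_cases hcc : s.getD i ' ' = s.getD (pvKmpFall s pi (s.getD i ' ') k k) ' '
  · rw [if_pos hcc]
    have hpskf : pvPS s i (pvKmpFall s pi (s.getD i ' ') k k) := by
      rcases hf1 with h | h
      · rw [h]; exact pvPS_zero (by omega) (by omega)
      · exact h.1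
    constructor
    · exact Or.inr ((pvPS_ext hil).mpr ⟨hpskf, hcc.symm⟩)
    · intro j hj
      match j, hj with
      | 0, _ => omega
      | m+1, hj =>
        have hm := (pvPS_ext hil).mp hj
        have := hf2 m hm.1 hm.2
        omega
  · rw [if_neg hcc]
    have hkf0 : pvKmpFall s pi (s.getD i ' ') k k = 0 := by
      rcases hf1 with h | h
      · exact h
      · exact absurd h.2.symm hcc
    constructor
    · exact Or.inl hkf0
    · intro j hj
      match j, hj with
      | 0, _ => omega
      | m+1, hj =>
        have hm := (pvPS_ext hil).mp hj
        have hm0 : m = 0 := by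
          have := hf2 m hm.1 hm.2
          omega
        subst hm0
        exfalso
        rw [hkf0] at hcc
        exact hcc hm.2.symm

lemma pvKmpLoop_spec (s : List Char) :
    ∀ n i pi k, s.length - i = n → 1 ≤ i → i ≤ s.length → pi.length = s.length →
      (∀ j, j < i → pvMaxPS s (j+1) (pi.getD j 0)) →
      pvMaxPS s i k →
      pvMaxPS s s.length (pvKmpLoop s pi k i) := by
  intro n
  induction n with
  | zero =>
    intro i pi k hn h1 hi hlen Hpi Hk
    have hie : i = s.length := by omega
    rw [pvKmpLoop, if_neg (by omega)]
    rw [← hie]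
    exact Hk
  | succ n ih =>
    intro i pi k hn h1 hi hlen Hpi Hk
    have hil : i < s.length := by omega
    rw [pvKmpLoop, if_pos hil]
    have Hnext := pvKmpNext_spec s pi k i hil h1 Hpi Hk
    refine ih (i+1) (pi.set i (pvKmpNext s pi k i)) (pvKmpNext s pi k i)
      (by omega) (by omega) (by omega) (by simp [hlen]) ?_ ?_
    · intro j hj
      rcases Nat.lt_or_ge j i with h | h
      · have e : (pi.set i (pvKmpNext s pi k i)).getD j 0 = pi.getD j 0 := by
          simp only [List.getD_eq_getElem?_getD, List.getElem?_set]
          rw [if_neg (by omega : ¬ i = j)]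
        rw [e]; exact Hpi j h
      · have hji : j = i := by omega
        subst hji
        have hjlen : j < pi.length := by omega
        have e : (pi.set j (pvKmpNext s pi k j)).getD j 0 = pvKmpNext s pi k j := by
          simp [List.getD_eq_getElem?_getD, hjlen]
        rw [e]; exact Hnext
    · exact Hnext

-- k is a suffix-of-l = prefix-of-r overlap length, stated pointwise.
def pvOv (l r : List Char) (k : Nat) : Prop :=
  k ≤ l.length ∧ k ≤ r.length ∧ ∀ x, x < k → l.getD (l.length - k + x) ' ' = r.getD x ' '

def pvMaxOv (l r : List Char) (k : Nat) : Prop :=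
  pvOv l r k ∧ ∀ j, pvOv l r j → j ≤ k

lemma pvOv_zero (l r : List Char) : pvOv l r 0 :=
  ⟨Nat.zero_le _, Nat.zero_le _, fun x hx => absurd hx (Nat.not_lt_zero x)⟩

lemma pvMaxOv_unique {l r : List Char} {k k' : Nat} (h1 : pvMaxOv l r k)
    (h2 : pvMaxOv l r k') : k = k' :=
  Nat.le_antisymm (h2.2 k h1.1) (h1.2 k' h2.1)

lemma pvSepGetD_left (r l : List Char) (c0 : Char) (x : Nat) (hx : x < r.length) :
    (r ++ c0 :: l).getD x ' ' = r.getD x ' ' := by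
  rw [List.getD_eq_getElem?_getD, List.getD_eq_getElem?_getD, List.getElem?_append_left hx]

lemma pvSepGetD_mid (r l : List Char) (c0 : Char) :
    (r ++ c0 :: l).getD r.length ' ' = c0 := by
  rw [List.getD_eq_getElem?_getD, List.getElem?_append_right (Nat.le_refl r.length)]
  simp

lemma pvSepGetD_right (r l : List Char) (c0 : Char) (x : Nat) :
    (r ++ c0 :: l).getD (r.length + 1 + x) ' ' = l.getD x ' ' := by
  rw [List.getD_eq_getElem?_getD, List.getD_eq_getElem?_getD,
    List.getElem?_append_right (by omega : r.length ≤ r.length + 1 + x)]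
  have e : r.length + 1 + x - r.length = x + 1 := by omega
  rw [e, List.getElem?_cons_succ]

lemma pvMem_of_getD {t : List Char} {x : Nat} (hx : x < t.length) : t.getD x ' ' ∈ t := by
  rw [List.getD_eq_getElem?_getD, List.getElem?_eq_getElem hx]
  exact List.getElem_mem hx

-- With a separator occurring in neither string, borders of r ++ c0 :: l are exactly
-- the suffix(l)/prefix(r) overlaps.
lemma pvPS_sep_iff (l r : List Char) (c0 : Char) (hcl : c0 ∉ l) (hcr : c0 ∉ r) (k : Nat) :
    pvPS (r ++ c0 :: l) (r.length + 1 + l.length) k ↔ pvOv l r k := by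
  have hslen : (r ++ c0 :: l).length = r.length + 1 + l.length := by
    simp only [List.length_append, List.length_cons]; omega
  constructor
  · rintro ⟨hk, _, hp⟩
    have hkl : k ≤ l.length := by
      by_contra hgt
      have h := hp (k - l.length - 1) (by omega)
      have e : r.length + 1 + l.length - k + (k - l.length - 1) = r.length := by omega
      rw [e, pvSepGetD_mid] at h
      have hxr : k - l.length - 1 < r.length := by omega
      rw [pvSepGetD_left r l c0 _ hxr] at h
      exact hcr (h ▸ pvMem_of_getD hxr)
    have hkr : k ≤ r.length := by
      by_contra hgt
      have h := hp r.length (by omega)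
      rw [pvSepGetD_mid] at h
      have e : r.length + 1 + l.length - k + r.length = r.length + 1 + (l.length + r.length - k) := by
        omega
      rw [e, pvSepGetD_right] at h
      have hxl : l.length + r.length - k < l.length := by omega
      exact hcl (h ▸ pvMem_of_getD hxl)
    refine ⟨hkl, hkr, fun x hx => ?_⟩
    have h := hp x hx
    rw [pvSepGetD_left r l c0 x (by omega)] at h
    have e : r.length + 1 + l.length - k + x = r.length + 1 + (l.length - k + x) := by omega
    rw [e, pvSepGetD_right] at h
    exact h.symm
  · rintro ⟨hkl, hkr, hp⟩
    refine ⟨by omega, Nat.le_of_eq hslen.symm, fun x hx => ?_⟩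
    rw [pvSepGetD_left r l c0 x (by omega)]
    have e : r.length + 1 + l.length - k + x = r.length + 1 + (l.length - k + x) := by omega
    rw [e, pvSepGetD_right]
    exact (hp x hx).symm

lemma pvMaxPS_sep_iff (l r : List Char) (c0 : Char) (hcl : c0 ∉ l) (hcr : c0 ∉ r) (k : Nat) :
    pvMaxPS (r ++ c0 :: l) (r ++ c0 :: l).length k ↔ pvMaxOv l r k := by
  have hslen : (r ++ c0 :: l).length = r.length + 1 + l.length := by
    simp only [List.length_append, List.length_cons]; omega
  rw [hslen]
  constructor
  · rintro ⟨h1, h2⟩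
    refine ⟨?_, fun j hj => h2 j ((pvPS_sep_iff l r c0 hcl hcr j).mpr hj)⟩
    rcases h1 with h | h
    · rw [h]; exact pvOv_zero l r
    · exact (pvPS_sep_iff l r c0 hcl hcr k).mp h
  · rintro ⟨h1, h2⟩
    exact ⟨Or.inr ((pvPS_sep_iff l r c0 hcl hcr k).mpr h1),
      fun j hj => h2 j ((pvPS_sep_iff l r c0 hcl hcr j).mp hj)⟩

-- A-side: evaluate the two slices.
lemma pvSliceFrom (l : List Char) (k : Nat) (h1 : 1 ≤ k) (hk : k ≤ l.length) :
    PySem.List.slice l (some (-((k : Nat) : Int))) none = l.drop (l.length - k) := by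
  simp only [PySem.List.slice, PySem.List.clampIdx]
  rw [if_pos (by omega : -((k : Nat) : Int) < 0)]
  rw [if_neg (by omega : ¬((l.length : Int) + -((k : Nat) : Int) < 0))]
  have e : ((l.length : Int) + -((k : Nat) : Int)).toNat = l.length - k := by omega
  rw [e]
  apply List.take_of_length_le
  simp only [List.length_drop]
  omega

lemma pvSliceTo (r : List Char) (k : Nat) :
    PySem.List.slice r none (some ((k : Nat) : Int)) = r.take k := by
  rw [PySem.List.slice_to r (by omega : (0:Int) ≤ ((k : Nat) : Int))]
  simp

lemma pvTakeDropEq_iff (l r : List Char) (k : Nat) (hkl : k ≤ l.length) (hkr : k ≤ r.length) :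
    (l.drop (l.length - k) = r.take k) ↔
      ∀ x, x < k → l.getD (l.length - k + x) ' ' = r.getD x ' ' := by
  constructor
  · intro h x hx
    have hh := congrArg (fun (t : List Char) => t.getD x ' ') h
    simp only [List.getD_eq_getElem?_getD, List.getElem?_drop, List.getElem?_take] at hh
    rw [if_pos hx] at hh
    rw [List.getD_eq_getElem?_getD, List.getD_eq_getElem?_getD]
    exact hh
  · intro h
    apply List.ext_getElem?
    intro x
    rw [List.getElem?_drop, List.getElem?_take]
    by_cases hxk : x < k
    · rw [if_pos hxk]
      have h1 : l.length - k + x < l.length := by omega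
      have h2 : x < r.length := by omega
      rw [List.getElem?_eq_getElem h1, List.getElem?_eq_getElem h2]
      have hg := h x hxk
      rw [List.getD_eq_getElem?_getD, List.getD_eq_getElem?_getD,
        List.getElem?_eq_getElem h1, List.getElem?_eq_getElem h2] at hg
      simpa using hg
    · rw [if_neg hxk]
      exact List.getElem?_eq_none (by omega)

lemma pvGoACond_iff (l r : List Char) (k : Nat) (h1 : 1 ≤ k) (hkl : k ≤ l.length)
    (hkr : k ≤ r.length) :
    (PySem.List.slice l (some (-((k : Nat) : Int))) none
        = PySem.List.slice r none (some ((k : Nat) : Int))) ↔ pvOv l r k := by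
  rw [pvSliceFrom l k h1 hkl, pvSliceTo r k, pvTakeDropEq_iff l r k hkl hkr]
  exact Iff.intro (fun h => ⟨hkl, hkr, h⟩) (fun h => h.2.2)

-- A's descending first match is the maximal overlap length.
lemma pvGoA_spec (l r : List Char) :
    ∀ m, m ≤ l.length → m ≤ r.length →
      pvOv l r (pvGoA l r m).length ∧ (pvGoA l r m).length ≤ m ∧
      (∀ j, j ≤ m → pvOv l r j → j ≤ (pvGoA l r m).length) := by
  intro m
  induction m with
  | zero =>
    intro _ _
    exact ⟨pvOv_zero l r, Nat.le_refl 0, fun j hj _ => hj⟩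
  | succ m ih =>
    intro hml hmr
    by_cases hcond : PySem.List.slice l (some (-(((m+1 : Nat)) : Int))) none
        = PySem.List.slice r none (some (((m+1 : Nat)) : Int))
    · have hres : pvGoA l r (m+1) = PySem.List.slice l (some (-(((m+1 : Nat)) : Int))) none := by
        simp only [pvGoA, if_pos hcond]
      have hov : pvOv l r (m+1) :=
        (pvGoACond_iff l r (m+1) (by omega) hml hmr).mp hcond
      have hlen : (pvGoA l r (m+1)).length = m+1 := by
        rw [hres, pvSliceFrom l (m+1) (by omega) hml]
        simp only [List.length_drop]
        omega
      rw [hlen]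
      exact ⟨hov, Nat.le_refl _, fun j hj _ => hj⟩
    · have hres : pvGoA l r (m+1) = pvGoA l r m := by
        simp only [pvGoA, if_neg hcond]
      rw [hres]
      obtain ⟨ha, hb, hc⟩ := ih (by omega) (by omega)
      refine ⟨ha, by omega, fun j hj hov => ?_⟩
      rcases Nat.lt_or_ge j (m+1) with h | h
      · exact hc j (by omega) hov
      · exfalso
        have hje : j = m+1 := by omega
        subst hje
        exact hcond ((pvGoACond_iff l r (m+1) (by omega) hml hmr).mpr hov)

lemma pvNulNotMemOfPrintable (t : String) (h : pvDomStr t = true) : Char.ofNat 0 ∉ t.toList := by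
  intro hmem
  unfold pvDomStr at h
  have h2 := (List.all_eq_true.mp h) _ hmem
  exact absurd h2 (by decide)

-- The per-pair equality: A's overlap length = B's KMP value.
lemma pvPerPair (a b : String) (ha : pvDomStr a = true) (hb : pvDomStr b = true) :
    (pvGetOverlap a b).length = pvOverlapLen a b := by
  have hcl := pvNulNotMemOfPrintable a ha
  have hcr := pvNulNotMemOfPrintable b hb
  unfold pvGetOverlap pvOverlapLen
  have hslen : (b.toList ++ Char.ofNat 0 :: a.toList).length
      = b.toList.length + 1 + a.toList.length := by
    simp only [List.length_append, List.length_cons]; omega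
  have hs1 : 1 ≤ (b.toList ++ Char.ofNat 0 :: a.toList).length := by omega
  have Hpi0 : ∀ j, j < 1 → pvMaxPS (b.toList ++ Char.ofNat 0 :: a.toList) (j+1)
      ((List.replicate (b.toList ++ Char.ofNat 0 :: a.toList).length 0).getD j 0) := by
    intro j hj
    have hj0 : j = 0 := by omega
    subst hj0
    have e : (List.replicate (b.toList ++ Char.ofNat 0 :: a.toList).length 0).getD 0 0 = 0 :=
      List.getD_replicate _ (by omega)
    rw [e]
    exact ⟨Or.inl rfl, fun j hj => by have := hj.1; omega⟩
  have Hk0 : pvMaxPS (b.toList ++ Char.ofNat 0 :: a.toList) 1 0 :=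
    ⟨Or.inl rfl, fun j hj => by have := hj.1; omega⟩
  have hK := pvKmpLoop_spec (b.toList ++ Char.ofNat 0 :: a.toList)
    ((b.toList ++ Char.ofNat 0 :: a.toList).length - 1) 1
    (List.replicate (b.toList ++ Char.ofNat 0 :: a.toList).length 0) 0
    rfl (Nat.le_refl 1) hs1 (by simp) Hpi0 Hk0
  rw [pvMaxPS_sep_iff a.toList b.toList (Char.ofNat 0) hcl hcr] at hK
  obtain ⟨ha1, _, ha3⟩ := pvGoA_spec a.toList b.toList (min a.toList.length b.toList.length)
    (Nat.min_le_left _ _) (Nat.min_le_right _ _)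
  have hAmax : pvMaxOv a.toList b.toList
      (pvGoA a.toList b.toList (min a.toList.length b.toList.length)).length :=
    ⟨ha1, fun j hj => ha3 j (Nat.le_min.mpr ⟨hj.1, hj.2.1⟩) hj⟩
  exact pvMaxOv_unique hAmax hK

-- ===== outer structure =====

def pvInnerA (d : PySem.Dict String String) (i : String) : PySem.Dict String Int :=
  d.keys.foldl (fun inn y =>
    if i ≠ y then inn.insert y ((pvGetOverlap (d.getD i "") (d.getD y "")).length : Int)
    else inn) PySem.Dict.empty

lemma pvFoldlIfFilter {β : Type} (keys : List String) (i : String) (g : β → String → β) :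
    ∀ init : β,
      keys.foldl (fun acc y => if i ≠ y then g acc y else acc) init
        = (keys.filter (fun y => y ≠ i)).foldl g init := by
  induction keys with
  | nil => intro init; rfl
  | cons y ys ih =>
    intro init
    by_cases h : y = i
    · subst h
      rw [List.foldl_cons, if_neg (not_not_intro rfl),
        List.filter_cons_of_neg (by simp)]
      exact ih init
    · rw [List.foldl_cons, if_pos (Ne.symm h),
        List.filter_cons_of_pos (by simp [h]), List.foldl_cons]
      exact ih (g init y)

lemma pvItemsUpdateSub (ps : List (String × String)) :
    ∀ (d : PySem.Dict String String), ∀ p ∈ (d.update ps).items, p ∈ d.items ∨ p ∈ ps := by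
  induction ps with
  | nil => intro d p hp; exact Or.inl hp
  | cons q qs ih =>
    intro d p hp
    rcases ih (d.insert q.1 q.2) p hp with h | h
    · rcases (PySem.Dict.mem_items_insert d q.1 q.2 p).mp h with h2 | h2
      · exact Or.inr (by rw [h2]; exact List.mem_cons_self ..)
      · exact Or.inl h2.1
    · exact Or.inr (List.mem_cons_of_mem q h)

lemma pvGetD_dom (dict : List (String × String)) (hdom : Dom_get_all_overlaps dict)
    (k : String) : pvDomStr ((PySem.Dict.ofList dict).getD k "") = true := by
  unfold Dom_get_all_overlaps at hdom
  rw [PySem.Dict.getD_eq_get?_getD]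
  cases hq : (PySem.Dict.ofList dict).get? k with
  | none => decide
  | some v =>
    have hmem := PySem.Dict.mem_items_of_get?_eq_some _ hq
    have hin : (k, v) ∈ dict := by
      rcases pvItemsUpdateSub dict PySem.Dict.empty _ hmem with h | h
      · simp [PySem.Dict.empty] at h
      · exact h
    have hall := (List.all_eq_true.mp hdom) _ hin
    rw [Bool.and_eq_true] at hall
    simpa using hall.2

lemma pvInnerA_items (dict : List (String × String)) (hdom : Dom_get_all_overlaps dict)
    (i : String) :
    (pvInnerA (PySem.Dict.ofList dict) i).items
      = ((PySem.Dict.ofList dict).keys.filter (fun y => y ≠ i)).map (fun y =>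
          (y, ((pvOverlapLen ((PySem.Dict.ofList dict).getD i "")
                ((PySem.Dict.ofList dict).getD y "")) : Int))) := by
  unfold pvInnerA
  rw [pvFoldlIfFilter]
  rw [PySem.Dict.items_foldl_insert_fresh _ (fun y => y)
    (fun y => ((pvGetOverlap ((PySem.Dict.ofList dict).getD i "")
        ((PySem.Dict.ofList dict).getD y "")).length : Int)) PySem.Dict.empty
    (fun a _ => PySem.Dict.contains_empty a)
    (by simpa using ((PySem.Dict.nodup_keys_ofList dict).filter _))]
  have hempty : (PySem.Dict.empty : PySem.Dict String Int).items = [] := rfl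
  rw [hempty, List.nil_append]
  apply List.map_congr_left
  intro y _
  rw [pvPerPair _ _ (pvGetD_dom dict hdom i) (pvGetD_dom dict hdom y)]

-- ===== VERDICT (by name: the statement is the Claim_ definition above) =====
theorem get_all_overlaps_spec : Claim_equal_get_all_overlaps := by
  intro dict hdom
  unfold Spec_get_all_overlaps
  show ((PySem.Dict.ofList dict).keys.foldl
      (fun dk i => dk.insert i (pvInnerA (PySem.Dict.ofList dict) i))
      PySem.Dict.empty).items.map (fun p => (p.1, p.2.items))
    = (PySem.Dict.ofList dict).keys.map (fun i =>
        (i, ((PySem.Dict.ofList dict).keys.filter (fun y => y ≠ i)).map (fun y =>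
          (y, ((pvOverlapLen ((PySem.Dict.ofList dict).getD i "")
                ((PySem.Dict.ofList dict).getD y "")) : Int)))))
  rw [PySem.Dict.items_foldl_insert_fresh _ (fun i => i)
    (fun i => pvInnerA (PySem.Dict.ofList dict) i) PySem.Dict.empty
    (fun a _ => PySem.Dict.contains_empty a)
    (by simpa using PySem.Dict.nodup_keys_ofList dict)]
  have hempty : (PySem.Dict.empty : PySem.Dict String (PySem.Dict String Int)).items = [] := rfl
  rw [hempty, List.nil_append, List.map_map]
  apply List.map_congr_left
  intro i _
  simp only [Function.comp]
  rw [pvInnerA_items dict hdom i]
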